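-- pv_equiv track=rewrite | github.com/xielisos567/HMM_extractor | step1_HMM_info_extract/HMM_info_extract.py | getHmmIndex
-- ===== SOURCE A (Python) =====
-- def getHmmIndex(stext, target=' '):
--     target_idnex = []
--     i = 0
--     start_r = 0
--     for s in stext:
--         if s == '-' and start_r == 0:
--             start_r = 1
--         if s == target and start_r != 0:
--             target_idnex.append(i)
--         i+= 1
--     return target_idnex
-- ===== SOURCE B (Python) =====
-- def getHmmIndex(stext, target=' '):
--     dash_idx = next((i for i, c in enumerate(stext) if c == '-'), None)
--     if dash_idx is None:
--         return []
--     return [i for i, c in enumerate(stext) if i >= dash_idx and c == target]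
-- ===== Notes on version B (the rewrite author's own statement) =====
-- stated objective: simpler
-- what changed: Replaces A's single stateful pass with an interleaved flag by a find-then-collect decomposition: first locate the position of the first dash character, then a comprehension keeps indices at or after that position whose char equals target.
import Mathlib
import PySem

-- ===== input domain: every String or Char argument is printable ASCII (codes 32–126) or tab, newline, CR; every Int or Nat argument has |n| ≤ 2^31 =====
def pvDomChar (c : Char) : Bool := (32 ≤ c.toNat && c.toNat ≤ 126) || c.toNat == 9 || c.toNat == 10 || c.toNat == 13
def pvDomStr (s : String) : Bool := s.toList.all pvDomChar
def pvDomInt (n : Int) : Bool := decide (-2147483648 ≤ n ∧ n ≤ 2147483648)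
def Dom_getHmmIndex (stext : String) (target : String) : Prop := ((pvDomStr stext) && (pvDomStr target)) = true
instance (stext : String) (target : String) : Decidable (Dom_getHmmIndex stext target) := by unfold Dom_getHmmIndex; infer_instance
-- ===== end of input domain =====

-- B replaces A's interleaved flag with a find-first-dash-then-collect decomposition (simpler); same return value, proved equal.
-- ===== PORT A =====
-- single pass with index i, flag start_r, accumulator target_idnex
def goA (target : String) : List Char → Int → Int → List Int → List Int
  | [], _, _, acc => acc
  | c :: rest, i, start_r, acc =>
    let start_r' := if c == '-' && start_r == 0 then 1 else start_r
    let acc' := if String.mk [c] == target && !(start_r' == 0) then acc ++ [i] else acc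
    goA target rest (i + 1) start_r' acc'

def getHmmIndex (stext : String) (target : String) : List Int :=
  goA target stext.toList 0 0 []

-- ===== PORT B =====
-- first index of '-' (the generator expression with next), none if absent
def findDash : List Char → Int → Option Int
  | [], _ => none
  | c :: rest, i => if c == '-' then some i else findDash rest (i + 1)

-- the comprehension [i for i, c in enumerate(stext) if i >= d and c == target]
def collectB (target : String) (d : Int) : List Char → Int → List Int
  | [], _ => []
  | c :: rest, i =>
    (if d ≤ i && String.mk [c] == target then [i] else []) ++ collectB target d rest (i + 1)

def getHmmIndex_alt (stext : String) (target : String) : List Int :=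
  match findDash stext.toList 0 with
  | none => []
  | some d => collectB target d stext.toList 0

-- ===== PRECONDITION & SPEC =====
def Spec_getHmmIndex (stext : String) (target : String) (out : List Int) : Prop := out = getHmmIndex_alt stext target
instance (stext : String) (target : String) (out : List Int) : Decidable (Spec_getHmmIndex stext target out) := by unfold Spec_getHmmIndex; infer_instance

-- ===== CLAIM (what is proved, stated in full; the proofs are below) =====
def Claim_equal_getHmmIndex : Prop := ∀ (stext : String) (target : String), Dom_getHmmIndex stext target → Spec_getHmmIndex stext target (getHmmIndex stext target)

-- ===== LEMMAS AND PROOFS =====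

lemma findDash_ge (l : List Char) (i d : Int) (h : findDash l i = some d) : i ≤ d := by
  induction l generalizing i with
  | nil => simp [findDash] at h
  | cons c rest ih =>
    simp only [findDash] at h
    split at h
    · injection h with h; omega
    · have := ih (i + 1) h; omega

lemma goA_one (target : String) (d : Int) (l : List Char) (i : Int) (acc : List Int)
    (hd : d ≤ i) : goA target l i 1 acc = acc ++ collectB target d l i := by
  induction l generalizing i acc with
  | nil => simp [goA, collectB]
  | cons c rest ih =>
    simp only [goA, collectB]
    rw [if_neg (by simp)]
    have h2 : d ≤ i + 1 := by omega
    by_cases hm : String.mk [c] = target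
    · rw [if_pos (by simp [hm]), if_pos (by simp [hm, hd]), ih (i+1) _ h2,
        List.append_assoc]
    · rw [if_neg (by simp [hm]), if_neg (by simp [hm]), ih (i+1) _ h2]
      rfl

lemma goA_zero (target : String) (l : List Char) (i : Int) (acc : List Int) :
    goA target l i 0 acc =
      acc ++ (match findDash l i with
              | none => []
              | some d => collectB target d l i) := by
  induction l generalizing i acc with
  | nil => simp [goA, findDash]
  | cons c rest ih =>
    by_cases hc : c = '-'
    · subst hc
      rw [show findDash ('-' :: rest) i = some i by simp [findDash]]
      simp only [goA]
      rw [if_pos (by decide)]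
      by_cases hm : String.mk ['-'] = target
      · rw [if_pos (by simp [hm]), goA_one target i rest (i+1) _ (by omega)]
        simp only [collectB]
        rw [if_pos (by simp [hm]), List.append_assoc]
      · rw [if_neg (by simp [hm]), goA_one target i rest (i+1) _ (by omega)]
        simp only [collectB]
        rw [if_neg (by simp [hm])]
        rfl
    · rw [show findDash (c :: rest) i = findDash rest (i + 1) by simp [findDash, hc]]
      simp only [goA]
      rw [if_neg (by simp [hc]), if_neg (by simp), ih (i+1) acc]
      cases hfd : findDash rest (i + 1) with
      | none => rfl
      | some d =>
        have hgt : i + 1 ≤ d := findDash_ge rest (i+1) d hfd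
        simp only [collectB]
        rw [if_neg (by intro h; simp at h; omega)]
        rfl

-- ===== VERDICT (by name: the statement is the Claim_ definition above) =====
theorem getHmmIndex_spec : Claim_equal_getHmmIndex := by
  intro stext target _
  unfold Spec_getHmmIndex getHmmIndex getHmmIndex_alt
  rw [goA_zero]
  cases h : findDash stext.toList 0 <;> simp
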